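-- pv_equiv track=rewrite | github.com/paul-heyse/kgforge | tools/repo_scan.py | _imports_target_modules
-- ===== SOURCE A (Python) =====
-- def _imports_target_modules(imports: list[str], targets: set[str]) -> bool:
--     """Return True when an import references any module in `targets`.
--
--     Parameters
--     ----------
--     imports : list[str]
--         Import targets recorded for a test module.
--     targets : set[str]
--         Module names included in the scan scope.
--
--     Returns
--     -------
--     bool
--         ``True`` when any import overlaps with the target modules.
--     """
--     if not targets:
--         return False
--     for imp in imports:
--         if imp in targets:
--             return True
--         for target in targets:
--             if target.startswith(f"{imp}.") or imp.startswith(f"{target}."):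
--                 return True
--     return False
-- ===== SOURCE B (Python) =====
-- def _imports_target_modules(imports: list[str], targets: set[str]) -> bool:
--     """Hash-set rewrite: precompute every dotted prefix of every target once,
--     then answer each import with set lookups instead of a scan over all
--     targets."""
--     if not targets:
--         return False
--     tset = set(targets)
--     # 'hits' = targets plus every proper dotted prefix of a target:
--     # imp in hits  <=>  imp in targets or some target startswith imp + "."
--     hits = set(tset)
--     for t in targets:
--         for i, ch in enumerate(t):
--             if ch == ".":
--                 hits.add(t[:i])
--     for imp in imports:
--         if imp in hits:
--             return True
--         for i, ch in enumerate(imp):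
--             if ch == "." and imp[:i] in tset:
--                 return True
--     return False
-- ===== Notes on version B (the rewrite author's own statement) =====
-- stated objective: alternative
-- what changed: Instead of comparing every import against every target with startswith in a nested loop, B precomputes one hash set of all targets plus every dotted prefix of a target and answers each import with set lookups on its own dotted prefixes, so no inner scan over targets remains.
import Mathlib
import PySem

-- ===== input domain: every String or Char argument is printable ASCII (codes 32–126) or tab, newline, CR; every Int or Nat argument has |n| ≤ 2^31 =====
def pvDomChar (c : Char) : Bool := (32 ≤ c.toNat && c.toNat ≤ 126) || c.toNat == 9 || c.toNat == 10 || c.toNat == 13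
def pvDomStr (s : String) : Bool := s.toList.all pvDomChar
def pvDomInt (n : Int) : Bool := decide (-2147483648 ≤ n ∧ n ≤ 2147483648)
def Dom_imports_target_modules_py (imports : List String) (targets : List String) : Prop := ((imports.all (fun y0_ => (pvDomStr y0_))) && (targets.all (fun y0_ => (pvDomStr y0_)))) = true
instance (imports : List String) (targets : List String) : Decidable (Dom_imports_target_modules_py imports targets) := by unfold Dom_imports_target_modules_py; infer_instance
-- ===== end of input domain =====

-- B replaces A's import×target startswith double loop by one precomputed hash set of
-- all dotted prefixes of targets plus per-import prefix lookups (objective: alternative).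

-- ===== PORT A =====
def imports_target_modules_py (imports : List String) (targets : List String) : Bool :=
  if targets.isEmpty then false
  else imports.any (fun imp =>
    PySem.Set.contains targets imp ||
    targets.any (fun t =>
      PySem.Str.startswith t (imp ++ ".") || PySem.Str.startswith imp (t ++ ".")))

-- ===== PORT B =====
-- t[:i] with 0 ≤ i ported as String.ofList (t.toList.take i) — exact for the nonnegative
-- indices produced by enumerate.
def imports_target_modules_py_alt (imports : List String) (targets : List String) : Bool :=
  if targets.isEmpty then false
  else
    let tset := PySem.Set.ofList targets
    let hits := targets.foldl (fun acc t =>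
      (PySem.List.enumerate t.toList).foldl (fun acc2 p =>
        if p.2 == '.' then PySem.Set.add acc2 (String.ofList (t.toList.take p.1.toNat)) else acc2)
        acc) (PySem.Set.ofList tset)
    imports.any (fun imp =>
      PySem.Set.contains hits imp ||
      (PySem.List.enumerate imp.toList).any (fun p =>
        (p.2 == '.') && PySem.Set.contains tset (String.ofList (imp.toList.take p.1.toNat))))

-- ===== PRECONDITION & SPEC =====
def Spec_imports_target_modules_py (imports : List String) (targets : List String) (out : Bool) : Prop := out = imports_target_modules_py_alt imports targets
instance (imports : List String) (targets : List String) (out : Bool) : Decidable (Spec_imports_target_modules_py imports targets out) := by unfold Spec_imports_target_modules_py; infer_instance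

-- ===== CLAIM (what is proved, stated in full; the proofs are below) =====
def Claim_equal_imports_target_modules_py : Prop := ∀ (imports : List String) (targets : List String), Dom_imports_target_modules_py imports targets → Spec_imports_target_modules_py imports targets (imports_target_modules_py imports targets)

-- ===== LEMMAS AND PROOFS =====

-- u ++ ['.'] is a prefix of v  ↔  v has a '.' at some position k with u = v.take k
theorem dotPrefix_iff (u v : List Char) :
    (u ++ ['.']) <+: v ↔ ∃ k, ∃ h : k < v.length, v[k] = '.' ∧ u = v.take k := by
  constructor
  · rintro ⟨rest, hrest⟩
    subst hrest
    refine ⟨u.length, by simp, by simp, by simp⟩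
  · rintro ⟨k, h, hk, hu⟩
    refine ⟨v.drop (k + 1), ?_⟩
    subst hu
    have hd : ('.' :: v.drop (k+1) : List Char) = v.drop k := by
      have := List.getElem_cons_drop (as := v) (h := h)
      simpa [hk] using this
    calc v.take k ++ ['.'] ++ v.drop (k+1) = v.take k ++ ('.' :: v.drop (k+1)) := by simp
      _ = v.take k ++ v.drop k := by rw [hd]
      _ = v := List.take_append_drop _ _


theorem eq_ofList_iff (x : String) (l : List Char) : x = String.ofList l ↔ x.toList = l := by
  constructor
  · intro h; rw [h]; simp
  · intro h; rw [← h]; simp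

theorem exists_enumerate_iff {α : Type} (xs : List α) (P : Int → α → Prop) :
    (∃ p ∈ PySem.List.enumerate xs, P p.1 p.2) ↔ ∃ k, ∃ _ : k < xs.length, P k xs[k] := by
  simp [PySem.List.mem_enumerate_iff]

theorem mem_foldl_addIf {α β : Type} [DecidableEq α] (l : List β) (s : List α)
    (c : β → Bool) (v : β → α) (x : α) :
    x ∈ l.foldl (fun acc p => if c p then PySem.Set.add acc (v p) else acc) s ↔
      x ∈ s ∨ ∃ p ∈ l, c p = true ∧ x = v p := by
  induction l generalizing s with
  | nil => simp
  | cons hd tl ih =>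
    simp only [List.foldl_cons, ih]
    by_cases hc : c hd = true
    · simp [hc, PySem.Set.mem_add, or_assoc]
    · simp [hc]

-- membership in the precomputed prefix set of B
theorem mem_hits (targets : List String) (s : List String) (x : String) :
    x ∈ targets.foldl (fun acc t =>
        (PySem.List.enumerate t.toList).foldl (fun acc2 p =>
          if p.2 == '.' then PySem.Set.add acc2 (String.ofList (t.toList.take p.1.toNat)) else acc2)
          acc) s ↔
      x ∈ s ∨ ∃ t ∈ targets, ∃ p ∈ PySem.List.enumerate t.toList,
        p.2 = '.' ∧ x = String.ofList (t.toList.take p.1.toNat) := by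
  induction targets generalizing s with
  | nil => simp
  | cons hd tl ih =>
    simp only [List.foldl_cons, ih,
      mem_foldl_addIf (PySem.List.enumerate hd.toList) s (fun p => p.2 == '.')
        (fun p => String.ofList (hd.toList.take p.1.toNat)) x]
    simp only [List.mem_cons, beq_iff_eq]
    constructor
    · rintro (⟨hx | ⟨p, hp, hc, hv⟩⟩ | ⟨t, ht, hrest⟩)
      · exact Or.inl hx
      · exact Or.inr ⟨hd, Or.inl rfl, p, hp, hc, hv⟩
      · exact Or.inr ⟨t, Or.inr ht, hrest⟩
    · rintro (hx | ⟨t, (rfl | ht), hrest⟩)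
      · exact Or.inl (Or.inl hx)
      · exact Or.inl (Or.inr hrest)
      · exact Or.inr ⟨t, ht, hrest⟩

-- ∃ dotted-prefix-of-t equals x  ↔  t startswith x ++ "."
theorem dotted_mem_iff (x t : String) :
    (∃ p ∈ PySem.List.enumerate t.toList, p.2 = '.' ∧ x = String.ofList (t.toList.take p.1.toNat)) ↔
      (x.toList ++ ['.']) <+: t.toList := by
  rw [exists_enumerate_iff t.toList (fun i c => c = '.' ∧ x = String.ofList (t.toList.take i.toNat))]
  rw [dotPrefix_iff]
  constructor
  · rintro ⟨k, h, hc, hx⟩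
    exact ⟨k, h, hc, by simpa [eq_ofList_iff] using hx⟩
  · rintro ⟨k, h, hc, hx⟩
    exact ⟨k, h, hc, by simpa [eq_ofList_iff] using congrArg String.ofList hx⟩

theorem startswith_dot_iff (b a : String) :
    PySem.Str.startswith b (a ++ ".") = true ↔ (a.toList ++ ['.']) <+: b.toList := by
  simp [PySem.Str.startswith_eq, PySem.Chars.startswith_iff]

-- the per-import conditions of the two programs agree
theorem perImport_iff (targets : List String) (imp : String) :
    (PySem.Set.contains targets imp ||
      targets.any (fun t =>
        PySem.Str.startswith t (imp ++ ".") || PySem.Str.startswith imp (t ++ "."))) =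
    (PySem.Set.contains
        (targets.foldl (fun acc t =>
          (PySem.List.enumerate t.toList).foldl (fun acc2 p =>
            if p.2 == '.' then PySem.Set.add acc2 (String.ofList (t.toList.take p.1.toNat)) else acc2)
            acc) (PySem.Set.ofList (PySem.Set.ofList targets))) imp ||
      (PySem.List.enumerate imp.toList).any (fun p =>
        (p.2 == '.') && PySem.Set.contains (PySem.Set.ofList targets)
          (String.ofList (imp.toList.take p.1.toNat)))) := by
  rw [Bool.eq_iff_iff]
  simp only [Bool.or_eq_true, List.any_eq_true, PySem.Set.contains_iff]
  rw [mem_hits]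
  simp only [PySem.Set.mem_ofList, Bool.and_eq_true, beq_iff_eq, PySem.Set.contains_iff,
    startswith_dot_iff]
  constructor
  · rintro (hmem | ⟨t, ht, (h1 | h2)⟩)
    · exact Or.inl (Or.inl hmem)
    · exact Or.inl (Or.inr ⟨t, ht, (dotted_mem_iff imp t).mpr h1⟩)
    · obtain ⟨p, hp, hc, hv⟩ := (dotted_mem_iff t imp).mpr h2
      exact Or.inr ⟨p, hp, hc, by rw [← hv]; exact ht⟩
  · rintro (⟨hmem | ⟨t, ht, hpre⟩⟩ | ⟨p, hp, hc, hv⟩)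
    · exact Or.inl hmem
    · exact Or.inr ⟨t, ht, Or.inl ((dotted_mem_iff imp t).mp hpre)⟩
    · refine Or.inr ⟨String.ofList (imp.toList.take p.1.toNat), hv, Or.inr ?_⟩
      exact (dotted_mem_iff _ imp).mp ⟨p, hp, hc, rfl⟩

-- ===== VERDICT (by name: the statement is the Claim_ definition above) =====
theorem imports_target_modules_py_spec : Claim_equal_imports_target_modules_py := by
  intro imports targets _
  unfold Spec_imports_target_modules_py imports_target_modules_py imports_target_modules_py_alt
  by_cases he : targets.isEmpty
  · simp [he]
  · simp only [he]
    have hfg := funext (fun imp => perImport_iff targets imp)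
    exact congrArg imports.any hfg
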